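-- pv_equiv track=rewrite | github.com/flyboy711/mcp-for-db | mcp_for_db/server/core/config_manager.py | _parse_quoted_value
-- ===== SOURCE A (Python) =====
-- def _parse_quoted_value(value_part: str, quote_char: str) -> tuple[str, str]:
--     """解析带引号的值
--
--     Args:
--         value_part: 以引号开始的字符串
--         quote_char: 引号字符 (" 或 ')
--
--     Returns:
--         tuple[str, str]: (value, comment)
--     """
--     # 查找匹配的结束引号
--     pos = 1  # 跳过开始引号
--     while pos < len(value_part):
--         if value_part[pos] == quote_char:
--             # 找到结束引号
--             quoted_value = value_part[1:pos]  # 提取引号内的值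
--             remaining = value_part[pos + 1:].strip()  # 引号后的部分
--
--             # 检查是否有注释
--             if remaining.startswith(' #') or remaining.startswith('#'):
--                 comment = remaining if remaining.startswith('#') else remaining
--                 return quoted_value, comment
--             elif remaining == "":
--                 return quoted_value, ""
--             else:
--                 # 引号后有其他内容，可能是格式错误，但我们尽量处理
--                 return quoted_value, ""
--         elif value_part[pos] == '\\' and pos + 1 < len(value_part):
--             # 跳过转义字符
--             pos += 2
--         else:
--             pos += 1
--
--     # 没找到结束引号，把整个当作值
--     return value_part, ""
-- ===== SOURCE B (Python) =====
-- def _parse_quoted_value(value_part: str, quote_char: str) -> tuple[str, str]: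
--     # One pass counting the parity of the backslash run preceding each char:
--     # a quote closes iff it is preceded (within the scanned region) by an even
--     # number of consecutive backslashes.
--     run = 0  # consecutive backslashes immediately before position p (indices >= 1)
--     for p in range(1, len(value_part)):
--         c = value_part[p]
--         if c == quote_char and run % 2 == 0:
--             value = value_part[1:p]
--             remaining = value_part[p + 1:].strip()
--             return (value, remaining) if remaining.startswith('#') else (value, "")
--         run = run + 1 if c == '\\' else 0
--     return value_part, ""
-- ===== Notes on version B (the rewrite author's own statement) =====
-- stated objective: simpler
-- what changed: Replaces A's stateful while-loop that jumps the index by 2 over escapes (and A's dead duplicated comment branches) with a single uniform per-character pass that tracks the parity of the run of backslashes preceding each character: a quote closes iff that run is even.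
import Mathlib
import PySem

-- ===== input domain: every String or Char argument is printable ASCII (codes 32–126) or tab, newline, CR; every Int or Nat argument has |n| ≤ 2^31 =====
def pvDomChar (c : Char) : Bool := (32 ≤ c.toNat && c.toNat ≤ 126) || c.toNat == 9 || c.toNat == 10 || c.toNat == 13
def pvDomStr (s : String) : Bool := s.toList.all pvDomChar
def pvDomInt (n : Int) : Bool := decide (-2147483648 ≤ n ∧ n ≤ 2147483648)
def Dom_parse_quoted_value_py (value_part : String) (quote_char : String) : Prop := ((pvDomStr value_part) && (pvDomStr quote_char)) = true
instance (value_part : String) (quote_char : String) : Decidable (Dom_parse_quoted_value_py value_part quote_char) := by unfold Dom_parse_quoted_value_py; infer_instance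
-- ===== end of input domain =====

-- B replaces A's stateful escape-skipping while-loop by a single uniform per-character pass that
-- tracks the parity of the backslash run before each character (objective: simpler).

-- ===== PORT A =====
-- A's while-loop: pos jumps by 2 over an escape, by 1 otherwise; closes at the first quote reached.
-- value_part[pos] == quote_char compares a 1-char string with the string quote_char: [s[pos]] = q.
-- Slices value_part[1:pos] / value_part[pos+1:] are (s.take pos).drop 1 / s.drop (pos+1): exact, since 1 ≤ pos < len here.
def pvAloop (s q : List Char) (pos : Nat) : String × String :=
  if h : pos < s.length then
    if [s[pos]] = q then
      -- quoted_value = value_part[1:pos]; remaining = value_part[pos+1:].strip()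
      if PySem.Chars.startswith (PySem.Chars.strip (s.drop (pos + 1))) [' ', '#'] ||
         PySem.Chars.startswith (PySem.Chars.strip (s.drop (pos + 1))) ['#'] then
        (String.ofList ((s.take pos).drop 1),
         String.ofList (if PySem.Chars.startswith (PySem.Chars.strip (s.drop (pos + 1))) ['#']
                        then PySem.Chars.strip (s.drop (pos + 1)) else PySem.Chars.strip (s.drop (pos + 1))))
      else if PySem.Chars.strip (s.drop (pos + 1)) = [] then (String.ofList ((s.take pos).drop 1), "")
      else (String.ofList ((s.take pos).drop 1), "")
    else if s[pos] = '\\' ∧ pos + 1 < s.length then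
      pvAloop s q (pos + 2)
    else
      pvAloop s q (pos + 1)
  else (String.ofList s, "")
termination_by s.length - pos
decreasing_by all_goals omega

def parse_quoted_value_py (value_part : String) (quote_char : String) : String × String :=
  pvAloop value_part.toList quote_char.toList 1

-- ===== PORT B =====
-- B's for-loop over range(1, len): every index is visited once; `run` counts the backslashes
-- immediately before p (the local c = value_part[p] is written inline as s[p]).
def pvBloop (s q : List Char) (p run : Nat) : String × String :=
  if h : p < s.length then
    if [s[p]] = q ∧ run % 2 = 0 then
      -- value = value_part[1:p]; remaining = value_part[p+1:].strip()
      if PySem.Chars.startswith (PySem.Chars.strip (s.drop (p + 1))) ['#'] then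
        (String.ofList ((s.take p).drop 1), String.ofList (PySem.Chars.strip (s.drop (p + 1))))
      else (String.ofList ((s.take p).drop 1), "")
    else pvBloop s q (p + 1) (if s[p] = '\\' then run + 1 else 0)
  else (String.ofList s, "")
termination_by s.length - p
decreasing_by omega

def parse_quoted_value_py_alt (value_part : String) (quote_char : String) : String × String :=
  pvBloop value_part.toList quote_char.toList 1 0

-- ===== PRECONDITION & SPEC =====
def Spec_parse_quoted_value_py (value_part : String) (quote_char : String) (out : String × String) : Prop := out = parse_quoted_value_py_alt value_part quote_char
instance (value_part : String) (quote_char : String) (out : String × String) : Decidable (Spec_parse_quoted_value_py value_part quote_char out) := by unfold Spec_parse_quoted_value_py; infer_instance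

-- ===== CLAIM (what is proved, stated in full; the proofs are below) =====
def Claim_equal_parse_quoted_value_py : Prop := ∀ (value_part : String) (quote_char : String), Dom_parse_quoted_value_py value_part quote_char → Spec_parse_quoted_value_py value_part quote_char (parse_quoted_value_py value_part quote_char)

-- ===== LEMMAS AND PROOFS =====

-- the reverse-side dropWhile of rstrip keeps a prefix of the original list
lemma rstrip_prefix (p : Char → Bool) (l : List Char) : (l.reverse.dropWhile p).reverse <+: l := by
  have h := List.dropWhile_suffix (l := l.reverse) p
  exact List.reverse_suffix.mp (by simpa using h)

-- the head of a stripped string is never whitespace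
lemma strip_head_not_space (t : List Char) (c : Char) (rest : List Char)
    (h : PySem.Chars.strip t = c :: rest) : PySem.Chars.isspace c = false := by
  unfold PySem.Chars.strip PySem.Chars.rstrip PySem.Chars.lstrip at h
  have hpre : c :: rest <+: List.dropWhile PySem.Chars.isspace t := by
    rw [← h]; exact rstrip_prefix _ _
  obtain ⟨tail, htail⟩ := hpre
  have h2 : List.dropWhile PySem.Chars.isspace t = c :: (rest ++ tail) := by
    simpa using htail.symm
  have hne : List.dropWhile PySem.Chars.isspace t ≠ [] := by simp [h2]
  have := List.head_dropWhile_not PySem.Chars.isspace hne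
  simpa [h2] using this

-- A's comment branches collapse to B's single startswith-'#' test (" #" cannot survive strip)
lemma close_eq (v u : List Char) :
    (if PySem.Chars.startswith (PySem.Chars.strip u) [' ', '#'] || PySem.Chars.startswith (PySem.Chars.strip u) ['#'] then
       (String.ofList v, String.ofList (if PySem.Chars.startswith (PySem.Chars.strip u) ['#'] then PySem.Chars.strip u else PySem.Chars.strip u))
     else if PySem.Chars.strip u = [] then (String.ofList v, "") else (String.ofList v, ""))
    = (if PySem.Chars.startswith (PySem.Chars.strip u) ['#'] then (String.ofList v, String.ofList (PySem.Chars.strip u)) else (String.ofList v, "")) := by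
  have hsp : PySem.Chars.startswith (PySem.Chars.strip u) [' ', '#'] = false := by
    cases hs : PySem.Chars.strip u with
    | nil => simp [PySem.Chars.startswith, List.isPrefixOf]
    | cons c rest =>
      by_cases hc : c = ' '
      · have := strip_head_not_space u c rest hs
        subst hc
        simp [PySem.Chars.isspace] at this
      · simp only [PySem.Chars.startswith, List.isPrefixOf]
        simp only [Bool.and_eq_false_iff]
        left
        simpa using fun h => hc h.symm
  rw [hsp]
  by_cases hh : PySem.Chars.startswith (PySem.Chars.strip u) ['#'] = true
  · simp [hh]
  · simp only [Bool.false_or, hh]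
    simp

-- pvBloop depends on run only through its parity
lemma pvBloop_parity : ∀ (fuel : Nat) (s q : List Char) (p r r' : Nat),
    s.length - p ≤ fuel → r % 2 = r' % 2 → pvBloop s q p r = pvBloop s q p r' := by
  intro fuel
  induction fuel with
  | zero =>
    intro s q p r r' hf _
    rw [pvBloop, pvBloop, dif_neg (by omega), dif_neg (by omega)]
  | succ n ih =>
    intro s q p r r' hf hpar
    rw [pvBloop, pvBloop]
    by_cases hp : p < s.length
    · rw [dif_pos hp, dif_pos hp]
      by_cases hq : [s[p]] = q
      · by_cases he : r % 2 = 0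
        · rw [if_pos (And.intro hq he), if_pos (And.intro hq (hpar ▸ he))]
        · have h1 : ¬([s[p]] = q ∧ r % 2 = 0) := fun hc => he hc.2
          have h2 : ¬([s[p]] = q ∧ r' % 2 = 0) := fun hc => he (hpar.trans hc.2)
          rw [if_neg h1, if_neg h2]
          apply ih _ _ _ _ _ (by omega)
          by_cases hb : s[p] = '\\'
          · simp [hb]; omega
          · simp [hb]
      · have h1 : ¬([s[p]] = q ∧ r % 2 = 0) := fun hc => hq hc.1
        have h2 : ¬([s[p]] = q ∧ r' % 2 = 0) := fun hc => hq hc.1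
        rw [if_neg h1, if_neg h2]
        apply ih _ _ _ _ _ (by omega)
        by_cases hb : s[p] = '\\'
        · simp [hb]; omega
        · simp [hb]
    · rw [dif_neg hp, dif_neg hp]

-- the two loops agree when B starts with an even run
lemma pvAloop_eq_pvBloop : ∀ (fuel : Nat) (s q : List Char) (pos : Nat),
    s.length - pos ≤ fuel → pvAloop s q pos = pvBloop s q pos 0 := by
  intro fuel
  induction fuel with
  | zero =>
    intro s q pos hf
    rw [pvAloop, pvBloop, dif_neg (by omega), dif_neg (by omega)]
  | succ n ih =>
    intro s q pos hf
    rw [pvAloop, pvBloop]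
    by_cases hp : pos < s.length
    · rw [dif_pos hp, dif_pos hp]
      by_cases hq : [s[pos]] = q
      · rw [if_pos hq, if_pos (And.intro hq (by omega))]
        exact close_eq _ _
      · have hq' : ¬([s[pos]] = q ∧ (0 : Nat) % 2 = 0) := fun hc => hq hc.1
        rw [if_neg hq, if_neg hq']
        by_cases hb : s[pos] = '\\'
        · simp only [if_pos hb]
          by_cases h1 : pos + 1 < s.length
          · rw [if_pos (And.intro hb h1), pvBloop, dif_pos h1]
            have hodd : ¬([s[pos + 1]] = q ∧ (0 + 1 : Nat) % 2 = 0) := fun hc => by omega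
            rw [if_neg hodd]
            calc pvAloop s q (pos + 2)
                = pvBloop s q (pos + 2) 0 := ih s q (pos + 2) (by omega)
              _ = pvBloop s q (pos + 2) (if s[pos + 1] = '\\' then 0 + 1 + 1 else 0) := by
                  apply pvBloop_parity (s.length) _ _ _ _ _ (by omega)
                  by_cases hb2 : s[pos + 1] = '\\' <;> simp [hb2]
          · have hnot : ¬(s[pos] = '\\' ∧ pos + 1 < s.length) := fun hc => h1 hc.2
            rw [if_neg hnot]
            rw [pvAloop, pvBloop, dif_neg (by omega), dif_neg (by omega)]
        · have hnot : ¬(s[pos] = '\\' ∧ pos + 1 < s.length) := fun hc => hb hc.1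
          rw [if_neg hnot, if_neg hb]
          exact ih s q (pos + 1) (by omega)
    · rw [dif_neg hp, dif_neg hp]

-- ===== VERDICT (by name: the statement is the Claim_ definition above) =====
theorem parse_quoted_value_py_spec : Claim_equal_parse_quoted_value_py := by
  intro v q _
  unfold Spec_parse_quoted_value_py parse_quoted_value_py parse_quoted_value_py_alt
  exact pvAloop_eq_pvBloop v.toList.length v.toList q.toList 1 (by omega)
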